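-- pv_equiv track=rewrite | github.com/ogabasseyy/ekaette | app/configs/host_allowlist.py | host_matches_allowlist
-- ===== SOURCE A (Python) =====
-- from collections.abc import Mapping, Sequence
--
-- def _normalize_hostname(value: str) -> str:
--     normalized = value.strip().lower().rstrip(".")
--     return normalized
--
-- def host_matches_allowlist(hostname: str, allowed_hosts: Sequence[str]) -> bool:
--     """Return True when hostname is explicitly allowed.
--
--     Wildcard entries must be of form `*.example.com` and only match subdomains
--     (`api.example.com`), not the parent apex (`example.com`).
--     """
--     normalized_hostname = _normalize_hostname(hostname)
--     if not normalized_hostname: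
--         return False
--
--     for candidate in allowed_hosts:
--         normalized = _normalize_hostname(str(candidate))
--         if not normalized:
--             continue
--         if normalized.startswith("*."):
--             base = normalized[2:]
--             if not base:
--                 continue
--             if normalized_hostname == base:
--                 continue
--             if normalized_hostname.endswith(f".{base}"):
--                 return True
--             continue
--         if normalized_hostname == normalized:
--             return True
--     return False
-- ===== SOURCE B (Python) =====
-- def _normalize_hostname(value: str) -> str:
--     return value.strip().lower().rstrip(".")
--
-- def host_matches_allowlist(hostname, allowed_hosts):
--     h = _normalize_hostname(hostname)
--     if not h:
--         return False
--     exact = set()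
--     wildcards = []
--     for candidate in allowed_hosts:
--         n = _normalize_hostname(str(candidate))
--         if not n:
--             continue
--         if n.startswith("*."):
--             base = n[2:]
--             if base:
--                 wildcards.append(base)
--         else:
--             exact.add(n)
--     if h in exact:
--         return True
--     return any(h.endswith("." + b) for b in wildcards)
-- ===== Notes on version B (the rewrite author's own statement) =====
-- stated objective: simpler
-- what changed: Instead of one interleaved loop with early return, B classifies the allowlist in a single pass into an exact-match set and a list of wildcard bases, then matches in two separate steps (set membership, then a suffix scan); the explicit apex check disappears because h can never end with '.'+h.
import Mathlib
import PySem

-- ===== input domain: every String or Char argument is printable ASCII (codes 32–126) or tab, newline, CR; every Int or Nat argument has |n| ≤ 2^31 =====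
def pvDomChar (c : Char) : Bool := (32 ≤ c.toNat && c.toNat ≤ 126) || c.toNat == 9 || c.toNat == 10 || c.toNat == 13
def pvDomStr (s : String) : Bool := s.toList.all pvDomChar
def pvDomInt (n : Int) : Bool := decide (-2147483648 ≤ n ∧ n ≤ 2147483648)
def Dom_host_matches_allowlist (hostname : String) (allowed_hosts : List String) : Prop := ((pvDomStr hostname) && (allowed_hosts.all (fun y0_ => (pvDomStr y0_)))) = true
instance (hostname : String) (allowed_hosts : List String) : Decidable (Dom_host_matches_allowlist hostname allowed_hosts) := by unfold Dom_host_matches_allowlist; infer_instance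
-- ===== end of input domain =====

-- B replaces A's single interleaved matching loop by a classification pass (exact-match set + wildcard-base list) followed by two separate checks; objective: simpler decomposition, same cost.


-- ===== PORT A =====
def pvNorm (s : String) : List Char :=
  -- value.strip().lower().rstrip(".")  -- rstrip(".") hand-ported exactly: drop trailing '.' chars
  ((PySem.Chars.lower (PySem.Chars.strip s.toList)).reverse.dropWhile (fun c => c == '.')).reverse

def pvGoA (h : List Char) : List String → Bool
  | [] => false
  | c :: rest =>
    let n := pvNorm c
    if n = [] then pvGoA h rest
    else if PySem.Chars.startswith n ['*', '.'] then
      let base := PySem.Chars.slice n (some 2) none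
      if base = [] then pvGoA h rest
      else if h = base then pvGoA h rest
      else if PySem.Chars.endswith h ('.' :: base) then true
      else pvGoA h rest
    else if h = n then true
    else pvGoA h rest

def host_matches_allowlist (hostname : String) (allowed_hosts : List String) : Bool :=
  let h := pvNorm hostname
  if h = [] then false else pvGoA h allowed_hosts


-- ===== PORT B =====
def pvStep (acc : PySem.Set (List Char) × List (List Char)) (c : String) :
    PySem.Set (List Char) × List (List Char) :=
  let n := pvNorm c
  if n = [] then acc
  else if PySem.Chars.startswith n ['*', '.'] then
    let base := PySem.Chars.slice n (some 2) none
    if base = [] then acc else (acc.1, acc.2 ++ [base])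
  else (PySem.Set.add acc.1 n, acc.2)

def host_matches_allowlist_alt (hostname : String) (allowed_hosts : List String) : Bool :=
  let h := pvNorm hostname
  if h = [] then false
  else
    let p := allowed_hosts.foldl pvStep (PySem.Set.ofList [], [])
    if PySem.Set.contains p.1 h then true
    else p.2.any (fun b => PySem.Chars.endswith h ('.' :: b))


-- ===== PRECONDITION & SPEC =====
def Spec_host_matches_allowlist (hostname : String) (allowed_hosts : List String) (out : Bool) : Prop := out = host_matches_allowlist_alt hostname allowed_hosts
instance (hostname : String) (allowed_hosts : List String) (out : Bool) : Decidable (Spec_host_matches_allowlist hostname allowed_hosts out) := by unfold Spec_host_matches_allowlist; infer_instance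

-- ===== CLAIM (what is proved, stated in full; the proofs are below) =====
def Claim_equal_host_matches_allowlist : Prop := ∀ (hostname : String) (allowed_hosts : List String), Dom_host_matches_allowlist hostname allowed_hosts → Spec_host_matches_allowlist hostname allowed_hosts (host_matches_allowlist hostname allowed_hosts)

-- ===== LEMMAS AND PROOFS =====
lemma pv_contains_add (E : PySem.Set (List Char)) (n h : List Char) :
    PySem.Set.contains (PySem.Set.add E n) h = (PySem.Set.contains E h || h == n) := by
  simp only [PySem.Set.add, PySem.Set.contains]
  by_cases hc : List.contains E n = true
  · rw [if_pos hc]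
    by_cases he : h = n
    · subst he; simp_all
    · simp [he]
  · rw [if_neg hc]
    by_cases he : h = n
    · subst he; simp_all [List.contains_eq_mem, List.mem_append]
    · simp [he, List.contains_eq_mem, List.mem_append]

lemma pv_endswith_self_false (h : List Char) :
    PySem.Chars.endswith h ('.' :: h) = false := by
  by_contra hcon
  have h1 : ('.' :: h) <:+ h := (PySem.Chars.endswith_iff h ('.' :: h)).1 (by
    cases hb : PySem.Chars.endswith h ('.' :: h) <;> simp_all)
  have := h1.length_le
  simp at this

lemma pv_key (h : List Char) (lst : List String) (E : PySem.Set (List Char))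
    (W : List (List Char)) :
    (if PySem.Set.contains (lst.foldl pvStep (E, W)).1 h then true
     else (lst.foldl pvStep (E, W)).2.any (fun b => PySem.Chars.endswith h ('.' :: b)))
    = (PySem.Set.contains E h || W.any (fun b => PySem.Chars.endswith h ('.' :: b))
        || pvGoA h lst) := by
  induction lst generalizing E W with
  | nil =>
    simp [pvGoA]
  | cons c rest ih =>
    simp only [List.foldl_cons, pvGoA, PySem.Chars.slice_eq_listSlice]
    by_cases hn : pvNorm c = []
    · have hstep : pvStep (E, W) c = (E, W) := by simp [pvStep, hn]
      rw [hstep, if_pos hn]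
      exact ih E W
    · rw [if_neg hn]
      by_cases hw : PySem.Chars.startswith (pvNorm c) ['*', '.'] = true
      · rw [if_pos hw]
        by_cases hb : PySem.List.slice (pvNorm c) (some 2) none = []
        · have hstep : pvStep (E, W) c = (E, W) := by simp [pvStep, hn, hw, hb]
          rw [hstep, if_pos hb]
          exact ih E W
        · have hstep : pvStep (E, W) c
              = (E, W ++ [PySem.List.slice (pvNorm c) (some 2) none]) := by
            simp [pvStep, hn, hw, hb]
          rw [hstep, if_neg hb,
            ih E (W ++ [PySem.List.slice (pvNorm c) (some 2) none])]
          by_cases ha : h = PySem.List.slice (pvNorm c) (some 2) none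
          · rw [if_pos ha]
            have hf : PySem.Chars.endswith h
                ('.' :: PySem.List.slice (pvNorm c) (some 2) none) = false := by
              rw [← ha]; exact pv_endswith_self_false h
            simp [List.any_append, hf]
          · rw [if_neg ha]
            by_cases hes : PySem.Chars.endswith h
                ('.' :: PySem.List.slice (pvNorm c) (some 2) none) = true
            · rw [if_pos hes]
              simp [List.any_append, hes]
            · rw [if_neg hes]
              simp only [Bool.not_eq_true] at hes
              simp [List.any_append, hes]
      · rw [if_neg hw]
        have hstep : pvStep (E, W) c = (PySem.Set.add E (pvNorm c), W) := by
          simp [pvStep, hn, hw]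
        rw [hstep, ih (PySem.Set.add E (pvNorm c)) W, pv_contains_add]
        by_cases he : h = pvNorm c
        · rw [if_pos he]; simp [he]
        · rw [if_neg he]
          have hne : (h == pvNorm c) = false := by simp [he]
          rw [hne]
          simp

-- ===== VERDICT (by name: the statement is the Claim_ definition above) =====
theorem host_matches_allowlist_spec : Claim_equal_host_matches_allowlist := by
  intro hostname allowed_hosts _
  unfold Spec_host_matches_allowlist host_matches_allowlist host_matches_allowlist_alt
  by_cases hh : pvNorm hostname = []
  · simp [hh]
  · simp only [if_neg hh]
    rw [pv_key]
    simp [PySem.Set.ofList, PySem.Set.contains]
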